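-- pv_equiv track=rewrite | github.com/deamonpog/ten | main.py | find_hashtag
-- ===== SOURCE A (Python) =====
-- from typing import List
--
-- def find_hashtag(hashtag_list_str: str, sorted_target_hashtags: List[str]) -> object:
--     if type(hashtag_list_str) != str:
--         return None
--     hashtag_list = hashtag_list_str.split(", ")
--     for lfh in sorted_target_hashtags:
--         if lfh in hashtag_list:
--             return lfh
--     return None
-- ===== SOURCE B (Python) =====
-- def find_hashtag(hashtag_list_str, sorted_target_hashtags):
--     if type(hashtag_list_str) != str:
--         return None
--     hashtag_list = hashtag_list_str.split(", ")
--     rank = {}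
--     for i, t in enumerate(sorted_target_hashtags):
--         rank.setdefault(t, i)
--     best = None
--     for h in hashtag_list:
--         r = rank.get(h)
--         if r is not None and (best is None or r < best):
--             best = r
--     return sorted_target_hashtags[best] if best is not None else None
-- ===== Notes on version B (the rewrite author's own statement) =====
-- stated objective: alternative
-- what changed: Instead of scanning the hashtag list once per target (nested membership tests), B builds a first-index rank dict over the targets once and then makes a single pass over the hashtag list keeping the minimum rank, returning the target at that rank.
import Mathlib
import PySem

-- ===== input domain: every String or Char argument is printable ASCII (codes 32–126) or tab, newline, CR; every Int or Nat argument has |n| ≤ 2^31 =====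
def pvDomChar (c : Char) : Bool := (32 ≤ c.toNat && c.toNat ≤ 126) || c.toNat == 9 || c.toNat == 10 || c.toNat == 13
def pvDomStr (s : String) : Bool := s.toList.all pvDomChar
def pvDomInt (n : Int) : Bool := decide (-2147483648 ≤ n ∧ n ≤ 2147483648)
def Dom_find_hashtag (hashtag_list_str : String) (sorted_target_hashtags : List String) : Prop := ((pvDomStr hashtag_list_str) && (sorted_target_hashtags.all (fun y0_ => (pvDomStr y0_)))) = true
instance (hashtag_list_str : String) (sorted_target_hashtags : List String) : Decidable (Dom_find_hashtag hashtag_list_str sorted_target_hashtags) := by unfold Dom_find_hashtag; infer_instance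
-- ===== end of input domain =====

-- B replaces A's per-target scans of the hashtag list by a first-index rank dict over the
-- targets and one pass over the hashtag list keeping the minimum rank (objective: alternative).

-- ===== PORT A =====
-- for lfh in sorted_target_hashtags: if lfh in hashtag_list: return lfh   (first match, else None)
def find_hashtag (hashtag_list_str : String) (sorted_target_hashtags : List String) : Option String :=
  let hashtag_list := (PySem.Str.split? hashtag_list_str ", ").getD []   -- sep ", " ≠ "", split? is some
  sorted_target_hashtags.find? (fun lfh => hashtag_list.contains lfh)

-- ===== PORT B =====
def find_hashtag_alt (hashtag_list_str : String) (sorted_target_hashtags : List String) : Option String :=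
  let hashtag_list := (PySem.Str.split? hashtag_list_str ", ").getD []   -- sep ", " ≠ "", split? is some
  -- rank = {}; for i, t in enumerate(...): rank.setdefault(t, i)
  let rank : PySem.Dict String Int :=
    (PySem.List.enumerate sorted_target_hashtags 0).foldl
      (fun d p => d.setdefault p.2 p.1) PySem.Dict.empty
  -- best = None; for h in hashtag_list: r = rank.get(h); update min
  let best : Option Int :=
    hashtag_list.foldl
      (fun b h =>
        match rank.get? h with
        | none => b
        | some r =>
          match b with
          | none => some r
          | some br => if r < br then some r else b)
      none
  match best with
  | none => none
  | some r => PySem.List.pyGet? sorted_target_hashtags r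

-- ===== PRECONDITION & SPEC =====
def Spec_find_hashtag (hashtag_list_str : String) (sorted_target_hashtags : List String) (out : Option String) : Prop := out = find_hashtag_alt hashtag_list_str sorted_target_hashtags
instance (hashtag_list_str : String) (sorted_target_hashtags : List String) (out : Option String) : Decidable (Spec_find_hashtag hashtag_list_str sorted_target_hashtags out) := by unfold Spec_find_hashtag; infer_instance

-- ===== CLAIM (what is proved, stated in full; the proofs are below) =====
def Claim_equal_find_hashtag : Prop := ∀ (hashtag_list_str : String) (sorted_target_hashtags : List String), Dom_find_hashtag hashtag_list_str sorted_target_hashtags → Spec_find_hashtag hashtag_list_str sorted_target_hashtags (find_hashtag hashtag_list_str sorted_target_hashtags)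

-- ===== LEMMAS AND PROOFS =====

-- rank characterisation: looking up t in the setdefault-fold gives the first index of t (offset n)
theorem rank_fold_get (ts : List String) (n : Int) (d : PySem.Dict String Int) (t : String) :
    ((PySem.List.enumerate ts n).foldl (fun d p => d.setdefault p.2 p.1) d).get? t
      = ((d.get? t).or ((List.idxOf? t ts).map (fun k : Nat => n + (k : Int)))) := by
  induction ts generalizing n d with
  | nil => simp [PySem.List.enumerate_nil]
  | cons x r ih =>
    rw [PySem.List.enumerate_cons]
    simp only [List.foldl_cons, ih]
    by_cases hx : x = t
    · subst hx
      rw [PySem.Dict.get?_setdefault_self]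
      cases hd : d.get? x with
      | some v => simp [Option.or]
      | none => simp [List.idxOf?_cons, Option.or]
    · rw [PySem.Dict.get?_setdefault_of_ne _ _ (by exact fun h => hx h.symm)]
      rw [List.idxOf?_cons]
      simp only [beq_iff_eq, hx, if_false]
      cases hd : d.get? t with
      | some v => simp [Option.or]
      | none =>
        cases hi : List.idxOf? t r with
        | none => simp [Option.or]
        | some k =>
          simp only [Option.map_some, Option.map_map, Option.none_or,
            Option.some.injEq]
          push_cast
          ring

theorem rank_get (ts : List String) (t : String) :
    ((PySem.List.enumerate ts 0).foldl (fun d p => d.setdefault p.2 p.1) PySem.Dict.empty).get? t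
      = (List.idxOf? t ts).map Int.ofNat := by
  rw [rank_fold_get]
  simp only [PySem.Dict.get?_empty, Option.none_or]
  cases List.idxOf? t ts <;> simp [Int.ofNat_eq_natCast]

-- the min-fold over the hashtag list, with the rank lookups replaced by first indices
theorem best_fold_rank (ts : List String) (hl : List String) (b : Option Int) :
    hl.foldl (fun b h =>
        match ((PySem.List.enumerate ts 0).foldl (fun d p => d.setdefault p.2 p.1) PySem.Dict.empty).get? h with
        | none => b
        | some r => match b with
          | none => some r
          | some br => if r < br then some r else b) b
    = (hl.filterMap (fun h => (List.idxOf? h ts).map Int.ofNat)).foldl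
        (fun b r => match b with
          | none => some r
          | some br => if r < br then some r else b) b := by
  induction hl generalizing b with
  | nil => rfl
  | cons h r ih =>
    simp only [List.foldl_cons, List.filterMap_cons]
    rw [rank_get ts h]
    cases hx : List.idxOf? h ts with
    | none => exact ih b
    | some k => exact ih _

theorem min_fold_eq_min? (xs : List Int) (a : Int) :
    xs.foldl (fun b r => match b with
        | none => some r
        | some br => if r < br then some r else b) (some a)
    = some (xs.foldl min a) := by
  induction xs generalizing a with
  | nil => rfl
  | cons x r ih =>
    simp only [List.foldl_cons]
    have hstep : (if x < a then some x else some a) = some (min a x) := by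
      rw [min_def]; split_ifs <;> simp only [Option.some.injEq] <;> omega
    rw [hstep, ih]

theorem min_fold_none_eq_min? (xs : List Int) :
    xs.foldl (fun b r => match b with
        | none => some r
        | some br => if r < br then some r else b) none
    = xs.min? := by
  cases xs with
  | nil => rfl
  | cons x r =>
    rw [List.foldl_cons, List.min?_cons']
    exact min_fold_eq_min? r x

-- find? via findIdx?
theorem find?_eq_findIdx?_bind {α : Type} (p : α → Bool) (xs : List α) :
    xs.find? p = (xs.findIdx? p).bind (fun i => xs[i]?) := by
  induction xs with
  | nil => rfl
  | cons x r ih =>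
    rw [List.find?_cons, List.findIdx?_cons]
    cases hp : p x with
    | true => simp
    | false =>
      simp only [ih]
      cases List.findIdx? p r <;> simp

-- idxOf? gives the first index: element there is t, and t does not occur earlier
theorem idxOf?_mem_and_min {α : Type} [BEq α] [LawfulBEq α] (t : α) (ts : List α) (k : Nat)
    (h : List.idxOf? t ts = some k) :
    ts[k]? = some t ∧ ∀ j, j < k → ts[j]? ≠ some t := by
  induction ts generalizing k with
  | nil => simp at h
  | cons x r ih =>
    rw [List.idxOf?_cons] at h
    by_cases hx : x = t
    · simp [hx] at h
      subst h
      exact ⟨by simp [hx], by omega⟩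
    · simp [hx] at h
      obtain ⟨k', hk', rfl⟩ := h
      obtain ⟨h1, h2⟩ := ih k' hk'
      refine ⟨by simpa using h1, ?_⟩
      intro j hj
      cases j with
      | zero => simpa using fun h => hx h
      | succ j' => simpa using h2 j' (by omega)

-- an index returned by idxOf? is in range and points at the value
theorem idxOf?_getElem {α : Type} [BEq α] [LawfulBEq α] (t : α) (ts : List α) (k : Nat)
    (h : List.idxOf? t ts = some k) : ∃ hk : k < ts.length, ts[k] = t := by
  obtain ⟨h1, _⟩ := idxOf?_mem_and_min t ts k h
  have hk : k < ts.length := by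
    by_contra hk
    rw [List.getElem?_eq_none (by omega)] at h1; simp at h1
  refine ⟨hk, ?_⟩
  rw [List.getElem?_eq_getElem hk] at h1
  exact Option.some_inj.mp h1

-- the key equality: min of first-indices of hashtags equals the index of the first matching target
theorem best_eq_findIdx? (hl ts : List String) :
    (hl.filterMap (fun h => (List.idxOf? h ts).map Int.ofNat)).min?
      = (ts.findIdx? (fun t => hl.contains t)).map Int.ofNat := by
  cases hfi : ts.findIdx? (fun t => hl.contains t) with
  | none =>
    have hnone : ∀ t ∈ ts, hl.contains t = false := List.findIdx?_eq_none_iff.mp hfi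
    have hfm : hl.filterMap (fun h => (List.idxOf? h ts).map Int.ofNat) = [] := by
      rw [List.filterMap_eq_nil_iff]
      intro h hh
      rw [Option.map_eq_none_iff, List.idxOf?_eq_none_iff]
      intro hm
      have := hnone h hm
      rw [List.contains_eq_mem, decide_eq_false_iff_not] at this
      exact this hh
    rw [hfm]
    rfl
  | some i0 =>
    obtain ⟨hlen, hfid⟩ := List.findIdx?_eq_some_iff_findIdx_eq.mp hfi
    have hp : hl.contains ts[i0] = true := by
      have h1 := List.findIdx_getElem (p := fun t => hl.contains t) (xs := ts)
        (w := by rw [hfid]; exact hlen)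
      simp only [hfid] at h1
      exact h1
    have hmin : ∀ j (hjl : j < ts.length), j < i0 → hl.contains ts[j] = false := by
      intro j hjl hj
      exact List.not_of_lt_findIdx (p := fun t => hl.contains t) (xs := ts)
        (i := j) (by rw [hfid]; exact hj)
    rw [Option.map_some, List.min?_eq_some_iff]
    constructor
    · rw [List.mem_filterMap]
      refine ⟨ts[i0], by rw [List.contains_eq_mem, decide_eq_true_iff] at hp; exact hp, ?_⟩
      cases hix : List.idxOf? ts[i0] ts with
      | none =>
        exact absurd (List.getElem_mem hlen) (List.idxOf?_eq_none_iff.mp hix)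
      | some k =>
        obtain ⟨hk, hts⟩ := idxOf?_getElem ts[i0] ts k hix
        obtain ⟨_, h2⟩ := idxOf?_mem_and_min ts[i0] ts k hix
        have hk_ge : i0 ≤ k := by
          by_contra hlt
          have hc := hmin k hk (by omega)
          rw [hts] at hc
          rw [hc] at hp
          exact Bool.false_ne_true hp
        have hk_le : k ≤ i0 := by
          by_contra hgt
          exact h2 i0 (by omega) (List.getElem?_eq_getElem hlen)
        have hki : k = i0 := by omega
        rw [Option.map_some, hki]
    · intro b hb
      rw [List.mem_filterMap] at hb
      obtain ⟨h, hh, hmap⟩ := hb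
      cases hix : List.idxOf? h ts with
      | none => rw [hix] at hmap; simp at hmap
      | some k =>
        rw [hix, Option.map_some, Option.some_inj] at hmap
        subst hmap
        obtain ⟨hk, hts⟩ := idxOf?_getElem h ts k hix
        have : i0 ≤ k := by
          by_contra hlt
          have hc := hmin k hk (by omega)
          rw [hts, List.contains_eq_mem, decide_eq_false_iff_not] at hc
          exact hc hh
        exact Int.ofNat_le.mpr this

-- ===== VERDICT (by name: the statement is the Claim_ definition above) =====
theorem find_hashtag_spec : Claim_equal_find_hashtag := by
  intro s ts _hd
  unfold Spec_find_hashtag find_hashtag find_hashtag_alt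
  generalize (PySem.Str.split? s ", ").getD [] = hl
  show List.find? (fun lfh => hl.contains lfh) ts =
    (match hl.foldl (fun b h =>
        match ((PySem.List.enumerate ts 0).foldl (fun d p => d.setdefault p.2 p.1) PySem.Dict.empty).get? h with
        | none => b
        | some r => match b with
          | none => some r
          | some br => if r < br then some r else b) none with
     | none => none
     | some r => PySem.List.pyGet? ts r)
  rw [best_fold_rank, min_fold_none_eq_min?, best_eq_findIdx?, find?_eq_findIdx?_bind]
  cases ts.findIdx? (fun t => hl.contains t) with
  | none => rfl
  | some i0 =>
    show ts[i0]? = PySem.List.pyGet? ts (Int.ofNat i0)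
    rw [show (Int.ofNat i0) = ((i0 : Nat) : Int) from rfl, PySem.List.pyGet?_natCast]
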